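-- pv_equiv track=rewrite | github.com/genecywang/devops-standards | openclaw_foundation/src/openclaw_foundation/tools/aws_elasticache_cluster_status.py | _summarize_node_statuses
-- ===== SOURCE A (Python) =====
-- from collections import Counter
--
-- def _summarize_node_statuses(raw_node_statuses: object) -> str:
--     if not isinstance(raw_node_statuses, list) or not raw_node_statuses:
--         return "none"
--
--     counts = Counter(
--         str(node_status.get("cache_node_status") or "unknown")
--         for node_status in raw_node_statuses
--         if isinstance(node_status, dict)
--     )
--     if not counts:
--         return "none"
--     return ", ".join(f"{status}={counts[status]}" for status in sorted(counts))
-- ===== SOURCE B (Python) =====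
-- def _summarize_node_statuses(raw_node_statuses: object) -> str:
--     if not isinstance(raw_node_statuses, list):
--         return "none"
--     statuses = sorted(
--         str(node.get("cache_node_status") or "unknown")
--         for node in raw_node_statuses
--         if isinstance(node, dict)
--     )
--     if not statuses:
--         return "none"
--     parts = []
--     i = 0
--     n = len(statuses)
--     while i < n:
--         j = i + 1
--         while j < n and statuses[j] == statuses[i]:
--             j += 1
--         parts.append(f"{statuses[i]}={j - i}")
--         i = j
--     return ", ".join(parts)
-- ===== Notes on version B (the rewrite author's own statement) =====
-- stated objective: alternative
-- what changed: Replaces Counter-hashing followed by sorting the distinct keys with sorting all status strings once and emitting counts by scanning adjacent equal runs (sort-then-group instead of hash-count-then-sort).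
import Mathlib
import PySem

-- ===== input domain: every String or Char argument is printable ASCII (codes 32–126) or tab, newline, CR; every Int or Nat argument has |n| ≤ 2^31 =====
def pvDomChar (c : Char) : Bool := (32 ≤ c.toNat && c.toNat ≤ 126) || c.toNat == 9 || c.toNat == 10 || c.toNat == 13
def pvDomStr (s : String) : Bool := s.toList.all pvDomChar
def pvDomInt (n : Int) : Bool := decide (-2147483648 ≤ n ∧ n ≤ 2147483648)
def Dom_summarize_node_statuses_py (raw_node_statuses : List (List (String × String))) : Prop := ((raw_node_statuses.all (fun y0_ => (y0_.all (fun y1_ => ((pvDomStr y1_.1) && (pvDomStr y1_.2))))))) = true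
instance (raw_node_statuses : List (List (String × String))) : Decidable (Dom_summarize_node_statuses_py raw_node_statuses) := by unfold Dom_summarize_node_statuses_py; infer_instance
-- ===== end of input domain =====

-- B replaces Counter-hashing-then-sorting-distinct-keys by sorting all status strings once
-- and counting adjacent equal runs (alternative algorithm, same results).


-- ===== PORT A =====
-- str(node.get("cache_node_status") or "unknown"): a missing key or an empty (falsy) value
-- yields "unknown"; str() of a string is the identity.
def pvStatusOf (node : List (String × String)) : String :=
  match PySem.Dict.get? (PySem.Dict.mk node) "cache_node_status" with
  | none => "unknown"
  | some s => if s = "" then "unknown" else s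

def summarize_node_statuses_py (raw_node_statuses : List (List (String × String))) : String :=
  -- `not isinstance(..., list)` is vacuous at this type; `not raw_node_statuses` is the emptiness test
  if raw_node_statuses = [] then "none"
  else
    -- the isinstance(node_status, dict) filter is vacuous at this type
    let counts := PySem.Dict.counter (raw_node_statuses.map pvStatusOf)
    if counts.items = [] then "none"
    else
      PySem.Str.join ", "
        ((PySem.List.sorted counts.keys (fun s => s)).map
          (fun status => status ++ "=" ++ PySem.Int.toStr (counts.getD status 0)))

-- ===== PORT B =====
-- the outer while loop of Source B: each step emits "status=(j-i)" for the run of elements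
-- equal to statuses[i] (the inner while = takeWhile) and resumes at j (= dropWhile)
def pvGroupRuns : List String → List String
  | [] => []
  | x :: xs =>
    (x ++ "=" ++ PySem.Int.toStr (1 + ((xs.takeWhile (· == x)).length : Int)))
      :: pvGroupRuns (xs.dropWhile (· == x))
termination_by l => l.length
decreasing_by
  exact Nat.lt_succ_of_le (List.length_dropWhile_le _ _)

def summarize_node_statuses_py_alt (raw_node_statuses : List (List (String × String))) : String :=
  -- isinstance checks are vacuous at this type
  let statuses := PySem.List.sorted (raw_node_statuses.map pvStatusOf) (fun s => s)
  if statuses = [] then "none"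
  else PySem.Str.join ", " (pvGroupRuns statuses)

-- ===== PRECONDITION & SPEC =====
def Spec_summarize_node_statuses_py (raw_node_statuses : List (List (String × String))) (out : String) : Prop := out = summarize_node_statuses_py_alt raw_node_statuses
instance (raw_node_statuses : List (List (String × String))) (out : String) : Decidable (Spec_summarize_node_statuses_py raw_node_statuses out) := by unfold Spec_summarize_node_statuses_py; infer_instance

-- ===== CLAIM (what is proved, stated in full; the proofs are below) =====
def Claim_equal_summarize_node_statuses_py : Prop := ∀ (raw_node_statuses : List (List (String × String))), Dom_summarize_node_statuses_py raw_node_statuses → Spec_summarize_node_statuses_py raw_node_statuses (summarize_node_statuses_py raw_node_statuses)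

-- ===== LEMMAS AND PROOFS =====

-- On a (≤)-sorted list L, the run-grouping of B produces exactly one entry per distinct
-- element, in order, labelled with its count in L; M names that list of distinct elements.
theorem pvGroupRuns_eq_map (L : List String) (hL : L.Pairwise (· ≤ ·))
    (M : List String) (hM : M.Pairwise (· < ·)) (hmem : ∀ a, a ∈ M ↔ a ∈ L) :
    pvGroupRuns L = M.map (fun s => s ++ "=" ++ PySem.Int.toStr ((L.count s : Int))) := by
  induction L using pvGroupRuns.induct generalizing M with
  | case1 =>
    have : M = [] := by
      cases M with
      | nil => rfl
      | cons m t => exact absurd ((hmem m).1 (List.mem_cons_self)) (by simp)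
    simp [this, pvGroupRuns]
  | case2 x xs ih =>
    have hpc := List.pairwise_cons.1 hL
    have hxle : ∀ a ∈ xs, x ≤ a := hpc.1
    have hxs : xs.Pairwise (· ≤ ·) := hpc.2
    have hrest : (xs.dropWhile (· == x)).Pairwise (· ≤ ·) :=
      hxs.sublist (List.dropWhile_sublist _)
    -- x does not occur past its initial run
    have hxnotin : ∀ (ys : List String), (∀ a ∈ ys, x ≤ a) → ys.Pairwise (· ≤ ·) →
        x ∉ ys.dropWhile (· == x) := by
      intro ys
      induction ys with
      | nil => intro _ _ h; simp at h
      | cons y t iht =>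
        intro hle hp
        by_cases hyx : (y == x) = true
        · rw [List.dropWhile_cons, if_pos hyx]
          exact iht (fun a ha => hle a (List.mem_cons_of_mem _ ha)) (List.pairwise_cons.1 hp).2
        · rw [List.dropWhile_cons, if_neg hyx]
          intro hmemx
          have hyne : y ≠ x := by simpa using hyx
          rcases List.mem_cons.1 hmemx with h | h
          · exact hyne h.symm
          · have h1 : y ≤ x := (List.pairwise_cons.1 hp).1 x h
            have h2 : x ≤ y := hle y List.mem_cons_self
            exact hyne (le_antisymm h1 h2)
    have hxnr : x ∉ xs.dropWhile (· == x) := hxnotin xs hxle hxs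
    -- every element of the initial run is x
    have hrun : ∀ a ∈ xs.takeWhile (· == x), a = x := by
      intro a ha
      have := List.mem_takeWhile_imp ha
      simpa using this
    have hsplit : xs.takeWhile (· == x) ++ xs.dropWhile (· == x) = xs :=
      List.takeWhile_append_dropWhile
    -- M starts with x
    have hxM : x ∈ M := (hmem x).2 List.mem_cons_self
    cases M with
    | nil => simp at hxM
    | cons m M' =>
      have hmpc := List.pairwise_cons.1 hM
      have hm : x = m := by
        rcases List.mem_cons.1 hxM with h | h
        · exact h
        · exfalso
          have h1 : m < x := hmpc.1 x h
          have h2 : x ≤ m := by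
            rcases List.mem_cons.1 ((hmem m).1 List.mem_cons_self) with h' | h'
            · exact le_of_eq h'.symm
            · exact hxle m h'
          exact absurd (lt_of_le_of_lt h2 h1) (lt_irrefl x)
      subst hm
      have hM' : M'.Pairwise (· < ·) := hmpc.2
      have hmem' : ∀ a, a ∈ M' ↔ a ∈ xs.dropWhile (· == x) := by
        intro a
        constructor
        · intro ha
          have hax : x ≠ a := ne_of_lt (hmpc.1 a ha)
          rcases List.mem_cons.1 ((hmem a).1 (List.mem_cons_of_mem _ ha)) with h | h
          · exact absurd h.symm hax
          · rw [← hsplit] at h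
            rcases List.mem_append.1 h with h' | h'
            · exact absurd (hrun a h').symm hax
            · exact h'
        · intro ha
          have hax : a ≠ x := by
            intro he; rw [he] at ha; exact hxnr ha
          have : a ∈ x :: M' :=
            (hmem a).2 (List.mem_cons_of_mem _ (by rw [← hsplit]; exact List.mem_append.2 (Or.inr ha)))
          rcases List.mem_cons.1 this with h | h
          · exact absurd h hax
          · exact h
      -- counts
      have hcx : (x :: xs).count x = 1 + (xs.takeWhile (· == x)).length := by
        have h1 : (xs.takeWhile (· == x)).count x = (xs.takeWhile (· == x)).length :=
          List.count_eq_length.2 (fun b hb => by simp [hrun b hb])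
        have h2 : (xs.dropWhile (· == x)).count x = 0 := List.count_eq_zero.2 hxnr
        rw [List.count_cons_self]
        conv_lhs => rw [← hsplit]
        rw [List.count_append, h1, h2]
        omega
      have hcs : ∀ s ∈ M', (x :: xs).count s = (xs.dropWhile (· == x)).count s := by
        intro s hs
        have hsx : x ≠ s := ne_of_lt (hmpc.1 s hs)
        have h1 : (xs.takeWhile (· == x)).count s = 0 :=
          List.count_eq_zero.2 (fun h => hsx ((hrun s h).symm))
        rw [List.count_cons_of_ne hsx]
        conv_lhs => rw [← hsplit]
        rw [List.count_append, h1]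
        omega
      rw [pvGroupRuns, List.map_cons, ih hrest M' hM' hmem']
      congr 1
      · congr 2
        rw [hcx]
        push_cast
        ring
      · apply List.map_congr_left
        intro s hs
        rw [hcs s hs]

theorem summarize_node_statuses_py_spec : Claim_equal_summarize_node_statuses_py := by
  intro raw _
  unfold Spec_summarize_node_statuses_py summarize_node_statuses_py summarize_node_statuses_py_alt
  by_cases hraw : raw = []
  · simp [hraw, PySem.List.sorted]
  · have hS : raw.map pvStatusOf ≠ [] := by simpa using hraw
    have hitems : (PySem.Dict.counter (raw.map pvStatusOf)).items ≠ [] := by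
      intro h
      have hk : (PySem.Dict.counter (raw.map pvStatusOf)).keys = [] := by
        simp [PySem.Dict.keys, h]
      rw [PySem.Dict.keys_counter] at hk
      cases hSc : raw.map pvStatusOf with
      | nil => exact hS hSc
      | cons a t =>
        have : a ∈ PySem.Set.ofList (raw.map pvStatusOf) :=
          (PySem.Set.mem_ofList _ _).2 (by rw [hSc]; exact List.mem_cons_self)
        rw [hk] at this
        simp at this
    have hLne : PySem.List.sorted (raw.map pvStatusOf) (fun s => s) ≠ [] := by
      intro h
      exact hS ((PySem.List.sorted_eq_nil_iff _ _ _).1 h)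
    have hmain := pvGroupRuns_eq_map
      (PySem.List.sorted (raw.map pvStatusOf) (fun s => s))
      (PySem.List.sorted_pairwise _ _)
      (PySem.List.sorted (PySem.Set.ofList (raw.map pvStatusOf)) (fun s => s))
      (PySem.List.sorted_ofList_pairwise_lt _)
      (by
        intro a
        rw [PySem.List.mem_sorted, PySem.List.mem_sorted, PySem.Set.mem_ofList])
    rw [if_neg hraw, if_neg hitems, if_neg hLne, PySem.Dict.keys_counter, hmain]
    apply congrArg
    apply List.map_congr_left
    intro s _
    rw [PySem.Dict.getD_counter, List.Perm.count_eq (PySem.List.sorted_perm _ _ _)]
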